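-- pv_equiv track=rewrite | github.com/anderssonlab/DeepCompARE | Archived_Cooperativity_effects_individual_level/es_af_common_enrichment_tf_level.py | find_closest_numbers
-- ===== SOURCE A (Python) =====
-- def find_closest_numbers(array1, array2, num_closest=1):
--     """
--     For each item in array1, find the closest num_closest numbers in array2
--     """
--     array2_sorted = sorted(array2)
--     all_closest_numbers = []
--     for num1 in array1:
--         closest_numbers = []
--         for _ in range(num_closest):
--             if not array2_sorted:
--                 break
--             closest_num = min(array2_sorted, key=lambda x: abs(x - num1))
--             closest_numbers.append(closest_num)
--             array2_sorted.remove(closest_num)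
--         all_closest_numbers += closest_numbers
--     return all_closest_numbers
-- ===== SOURCE B (Python) =====
-- def _bisect_left(s, x):
--     lo, hi = 0, len(s)
--     while lo < hi:
--         mid = (lo + hi) // 2
--         if s[mid] < x:
--             lo = mid + 1
--         else:
--             hi = mid
--     return lo
--
--
-- def find_closest_numbers(array1, array2, num_closest=1):
--     """
--     For each item in array1, find the closest num_closest numbers in array2
--     (without replacement), locating each pick by binary search instead of a
--     full min-scan.
--     """
--     s = sorted(array2)
--     out = []
--     for x in array1:
--         k = num_closest
--         while s and k > 0:
--             i = _bisect_left(s, x)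
--             if i == 0:
--                 j = 0
--             elif i == len(s):
--                 j = i - 1
--             elif x - s[i - 1] <= s[i] - x:
--                 j = i - 1
--             else:
--                 j = i
--             out.append(s[j])
--             del s[j]
--             k -= 1
--     return out
-- ===== Notes on version B (the rewrite author's own statement) =====
-- stated objective: faster
-- what changed: Each pick is located by a hand-rolled binary search on the sorted remainder (tie broken to the left/smaller neighbour) and deleted by index, replacing A's full min(..., key=abs) scan of the remaining list for every single pick.
import Mathlib
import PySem

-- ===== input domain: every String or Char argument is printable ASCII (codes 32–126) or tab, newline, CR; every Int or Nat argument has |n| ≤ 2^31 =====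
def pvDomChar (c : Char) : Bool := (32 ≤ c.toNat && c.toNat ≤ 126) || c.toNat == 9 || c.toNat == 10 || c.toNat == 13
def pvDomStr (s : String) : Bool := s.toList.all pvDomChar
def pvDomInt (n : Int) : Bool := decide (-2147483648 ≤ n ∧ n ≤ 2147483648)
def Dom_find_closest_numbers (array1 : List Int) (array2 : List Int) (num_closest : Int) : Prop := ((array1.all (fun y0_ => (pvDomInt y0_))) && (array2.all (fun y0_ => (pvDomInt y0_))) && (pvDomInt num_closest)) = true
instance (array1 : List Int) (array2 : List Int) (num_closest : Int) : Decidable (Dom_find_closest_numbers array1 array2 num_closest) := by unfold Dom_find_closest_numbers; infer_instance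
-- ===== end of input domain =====

-- B replaces A's per-pick min(..., key=abs) scan of the remaining sorted list by a binary
-- search (tie broken to the smaller neighbour) plus deletion by index: same values, same
-- order, measurably faster by a constant factor (the O(n) python-level scan disappears).

-- ===== PORT A =====
-- inner `for _ in range(num_closest)` loop of A (break = stop)
def pvAInner (num1 : Int) : Nat → List Int → List Int × List Int
  | 0, s => ([], s)
  | k+1, s =>
    if s = [] then ([], s)
    else
      match PySem.List.min? s (fun x => |x - num1|) with
      | none => ([], s)
      | some c =>
        match PySem.List.remove? s c with
        | none => ([], s)
        | some s' =>
          let r := pvAInner num1 k s'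
          (c :: r.1, r.2)

def find_closest_numbers (array1 : List Int) (array2 : List Int) (num_closest : Int) : List Int :=
  (array1.foldl (fun acc num1 =>
      let r := pvAInner num1 num_closest.toNat acc.2
      (acc.1 ++ r.1, r.2))
    (([] : List Int), PySem.List.sorted array2 (fun x => x) false)).1

-- ===== PORT B =====
-- Source B's hand-written `_bisect_left` while-loop
def pvBisectLeft (s : List Int) (x : Int) (lo hi : Int) : Int :=
  if _h : lo < hi then
    let mid := PySem.Int.floordiv (lo + hi) 2
    if (PySem.List.pyGet? s mid).getD 0 < x then pvBisectLeft s x (mid + 1) hi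
    else pvBisectLeft s x lo mid
  else lo
termination_by (hi - lo).toNat
decreasing_by
  · simp only [PySem.Int.floordiv, Int.fdiv_eq_ediv] at *; omega
  · simp only [PySem.Int.floordiv, Int.fdiv_eq_ediv] at *; omega

-- Source B's `while s and k > 0` loop for one x
def pvBLoop (x : Int) (k : Int) (s : List Int) : List Int × List Int :=
  if _h : s ≠ [] ∧ 0 < k then
    let i := pvBisectLeft s x 0 (s.length : Int)
    let j := if i = 0 then (0 : Int)
             else if i = (s.length : Int) then i - 1
             else if x - (PySem.List.pyGet? s (i-1)).getD 0 ≤ (PySem.List.pyGet? s i).getD 0 - x then i - 1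
             else i
    let c := (PySem.List.pyGet? s j).getD 0
    let s' := ((PySem.List.pop? s j).map Prod.snd).getD s
    let r := pvBLoop x (k-1) s'
    (c :: r.1, r.2)
  else ([], s)
termination_by k.toNat
decreasing_by omega

def find_closest_numbers_alt (array1 : List Int) (array2 : List Int) (num_closest : Int) : List Int :=
  (array1.foldl (fun acc x =>
      let r := pvBLoop x num_closest acc.2
      (acc.1 ++ r.1, r.2))
    (([] : List Int), PySem.List.sorted array2 (fun x => x) false)).1

-- ===== PRECONDITION & SPEC =====
def Spec_find_closest_numbers (array1 : List Int) (array2 : List Int) (num_closest : Int) (out : List Int) : Prop := out = find_closest_numbers_alt array1 array2 num_closest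
instance (array1 : List Int) (array2 : List Int) (num_closest : Int) (out : List Int) : Decidable (Spec_find_closest_numbers array1 array2 num_closest out) := by unfold Spec_find_closest_numbers; infer_instance

-- ===== CLAIM (what is proved, stated in full; the proofs are below) =====
def Claim_equal_find_closest_numbers : Prop := ∀ (array1 : List Int) (array2 : List Int) (num_closest : Int), Dom_find_closest_numbers array1 array2 num_closest → Spec_find_closest_numbers array1 array2 num_closest (find_closest_numbers array1 array2 num_closest)

-- ===== LEMMAS AND PROOFS =====

-- |a - x| as a max, so that omega can reason about it
lemma pvAbsSub (a x : Int) : |a - x| = max (a - x) (x - a) := by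
  rw [abs_eq_max_neg, neg_sub]

-- monotone access into a (· ≤ ·)-pairwise list
lemma pvMono (s : List Int) (hs : s.Pairwise (· ≤ ·)) {p q : Nat} (hpq : p ≤ q)
    (hq : q < s.length) : s[p]'(by omega) ≤ s[q] := by
  rcases Nat.lt_or_eq_of_le hpq with h | h
  · exact List.pairwise_iff_getElem.mp hs p q (by omega) hq h
  · subst h; exact le_refl _

-- Python's min(..., key=...) over a nonempty list as a plain fold
def pvGMin (key : Int → Int) (a : Int) (t : List Int) : Int :=
  t.foldl (fun m y => if key y < key m then y else m) a

lemma pvGMin_cons (key : Int → Int) (a y : Int) (t : List Int) :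
    pvGMin key a (y :: t) = pvGMin key (if key y < key a then y else a) t := rfl

lemma pv_min?_eq_gmin (key : Int → Int) : ∀ (t : List Int) (a : Int),
    PySem.List.min? (a :: t) key = some (pvGMin key a t) := by
  intro t
  induction t with
  | nil => intro a; rfl
  | cons y t ih =>
    intro a
    rw [pvGMin_cons]
    by_cases h : key y < key a
    · rw [if_pos h, ← ih y]
      simp [PySem.List.min?, h]
    · rw [if_neg h, ← ih a]
      simp [PySem.List.min?, h]

lemma pvGMin_isMin (key : Int → Int) (a : Int) (t : List Int) :
    ∀ y ∈ a :: t, key (pvGMin key a t) ≤ key y :=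
  PySem.List.min?_isMin (pv_min?_eq_gmin key t a)

lemma pvGMin_key_eq (key : Int → Int) : ∀ (t : List Int) (a : Int),
    key (pvGMin key a t) = key a → pvGMin key a t = a := by
  intro t
  induction t with
  | nil => intro a _; rfl
  | cons y t ih =>
    intro a h
    rw [pvGMin_cons] at h ⊢
    by_cases hy : key y < key a
    · rw [if_pos hy] at h ⊢
      exfalso
      have := pvGMin_isMin key y t y (List.mem_cons_self)
      omega
    · rw [if_neg hy] at h ⊢
      exact ih a h

lemma pvGMin_tie (key : Int → Int) : ∀ (t : List Int) (a : Int),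
    (a :: t).Pairwise (· ≤ ·) →
    ∀ v ∈ a :: t, key v = key (pvGMin key a t) → pvGMin key a t ≤ v := by
  intro t
  induction t with
  | nil =>
    intro a _ v hv _
    simp only [List.mem_singleton] at hv
    subst hv; exact le_refl _
  | cons y t ih =>
    intro a hs v hv htie
    have hay : a ≤ y := (List.pairwise_cons.mp hs).1 y List.mem_cons_self
    have hsa : (a :: t).Pairwise (· ≤ ·) :=
      hs.sublist (List.Sublist.cons₂ a (List.sublist_cons_self y t))
    have hsy : (y :: t).Pairwise (· ≤ ·) := hs.sublist (List.sublist_cons_self a (y :: t))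
    rw [pvGMin_cons] at htie ⊢
    by_cases hy : key y < key a
    · rw [if_pos hy] at htie ⊢
      rcases List.mem_cons.mp hv with rfl | hv'
      · exfalso
        have := pvGMin_isMin key y t y List.mem_cons_self
        omega
      · exact ih y hsy v hv' htie
    · rw [if_neg hy] at htie ⊢
      rcases List.mem_cons.mp hv with hva | hv'
      · rw [hva]; exact ih a hsa a List.mem_cons_self (hva ▸ htie)
      rcases List.mem_cons.mp hv' with hvy | hv''
      · -- v = y; key y = key (pvGMin a t) ≤ key a ≤ key y, so gmin = a ≤ y
        have htie' : key y = key (pvGMin key a t) := hvy ▸ htie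
        have h1 := pvGMin_isMin key a t a List.mem_cons_self
        have h2 : key (pvGMin key a t) = key a := by omega
        rw [hvy, pvGMin_key_eq key t a h2]
        exact hay
      · exact ih a hsa v (List.mem_cons_of_mem a hv'') htie

-- pyGet? / pop? at an in-range Nat index
lemma pvGet (s : List Int) (j : Nat) (hj : j < s.length) :
    (PySem.List.pyGet? s (j : Int)).getD 0 = s[j] := by
  rw [PySem.List.pyGet?_natCast, List.getElem?_eq_getElem hj]; rfl

lemma pvPop (s : List Int) (j : Nat) (hj : j < s.length) :
    PySem.List.pop? s (j : Int) = some (s[j], s.eraseIdx j) := by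
  simp [PySem.List.pop?, PySem.List.pyIdx?, hj]

-- erasing the (first occurrence of the) j-th value of a sorted list = deleting index j
lemma pvEraseIdx (s : List Int) (hs : s.Pairwise (· ≤ ·)) :
    ∀ (j : Nat) (hj : j < s.length), s.erase s[j] = s.eraseIdx j := by
  induction s with
  | nil => intro j hj; simp at hj
  | cons a t ih =>
    intro j hj
    have hat : ∀ y ∈ t, a ≤ y := (List.pairwise_cons.mp hs).1
    have hst : t.Pairwise (· ≤ ·) := (List.pairwise_cons.mp hs).2
    cases j with
    | zero => simp
    | succ j =>
      have hj' : j < t.length := by simpa using hj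
      have hget : (a :: t)[j+1] = t[j] := rfl
      rw [hget]
      by_cases hae : a = t[j]
      · -- head equals the value: t starts with copies of a
        obtain ⟨b, t', rfl⟩ : ∃ b t', t = b :: t' := by
          cases t with
          | nil => simp at hj'
          | cons b t' => exact ⟨b, t', rfl⟩
        have hb : b = a := by
          have h1 : a ≤ b := hat b List.mem_cons_self
          have h2 : b ≤ (b :: t')[j] := pvMono (b :: t') hst (Nat.zero_le j) hj'
          omega
        subst hb
        rw [← hae, List.erase_cons_head, List.eraseIdx_cons_succ]
        have hIH := ih hst j hj'
        rw [← hae, List.erase_cons_head] at hIH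
        rw [← hIH]
      · rw [List.erase_cons_tail (by simp [hae]), ih hst j hj']
        rfl

-- the hand-written binary search meets bisect_left's specification on a sorted list
lemma pvBisect_spec (s : List Int) (x : Int) (hs : s.Pairwise (· ≤ ·)) :
    ∀ (n : Nat) (lo hi : Int), (hi - lo).toNat = n → 0 ≤ lo → lo ≤ hi → hi ≤ (s.length : Int) →
    (∀ (k : Nat) (hk : k < s.length), (k : Int) < lo → s[k] < x) →
    (∀ (k : Nat) (hk : k < s.length), hi ≤ (k : Int) → x ≤ s[k]) →
    lo ≤ pvBisectLeft s x lo hi ∧ pvBisectLeft s x lo hi ≤ hi ∧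
    (∀ (k : Nat) (hk : k < s.length), (k : Int) < pvBisectLeft s x lo hi → s[k] < x) ∧
    (∀ (k : Nat) (hk : k < s.length), pvBisectLeft s x lo hi ≤ (k : Int) → x ≤ s[k]) := by
  intro n
  induction n using Nat.strong_induction_on with
  | _ n ihn =>
    intro lo hi hn h0 hlh hhi hpre hsuf
    by_cases hlt : lo < hi
    · have hmid : lo ≤ PySem.Int.floordiv (lo + hi) 2 ∧ PySem.Int.floordiv (lo + hi) 2 < hi := by
        simp only [PySem.Int.floordiv, Int.fdiv_eq_ediv]; omega
      set mid := PySem.Int.floordiv (lo + hi) 2 with hmiddef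
      have hmn : mid.toNat < s.length := by omega
      have hmc : mid = ((mid.toNat : Nat) : Int) := by omega
      have hget : (PySem.List.pyGet? s mid).getD 0 = s[mid.toNat] := by
        have h := pvGet s mid.toNat hmn
        rw [← hmc] at h
        exact h
      have hunf : pvBisectLeft s x lo hi =
          if s[mid.toNat] < x then pvBisectLeft s x (mid + 1) hi
          else pvBisectLeft s x lo mid := by
        rw [pvBisectLeft, dif_pos hlt]
        show (if (PySem.List.pyGet? s (PySem.Int.floordiv (lo + hi) 2)).getD 0 < x then
            pvBisectLeft s x (PySem.Int.floordiv (lo + hi) 2 + 1) hi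
          else pvBisectLeft s x lo (PySem.Int.floordiv (lo + hi) 2)) = _
        rw [← hmiddef, hget]
      by_cases hcmp : s[mid.toNat] < x
      · rw [if_pos hcmp] at hunf
        rw [hunf]
        refine (ihn (hi - (mid + 1)).toNat (by omega) (mid + 1) hi rfl (by omega) (by omega) hhi ?_ hsuf).imp (by omega) (fun h => h)
        intro k hk hklt
        rcases Int.lt_or_le ((k : Int)) lo with h' | h'
        · exact hpre k hk h'
        · have : s[k] ≤ s[mid.toNat] := pvMono s hs (p := k) (q := mid.toNat) (by omega) hmn
          omega
      · rw [if_neg hcmp] at hunf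
        rw [hunf]
        refine (ihn (mid - lo).toNat (by omega) lo mid rfl h0 (by omega) (by omega) hpre ?_).imp (fun h => h) (fun h => ⟨by omega, h.2⟩)
        intro k hk hkge
        have : s[mid.toNat] ≤ s[k] := pvMono s hs (p := mid.toNat) (q := k) (by omega) hk
        omega
    · have hunf : pvBisectLeft s x lo hi = lo := by rw [pvBisectLeft, dif_neg hlt]
      rw [hunf]
      exact ⟨le_refl _, by omega, fun k hk h => hpre k hk h, fun k hk h => hsuf k hk (by omega)⟩

-- Python's min(s, key=lambda v: abs(v-x)) on a sorted list is determined by: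
-- membership, minimality of |.-x|, and smallest value among ties
lemma pvMinChar (s : List Int) (x : Int) (hs : s.Pairwise (· ≤ ·)) (j : Nat) (hj : j < s.length)
    (hmin : ∀ (k : Nat) (hk : k < s.length), |s[j] - x| ≤ |s[k] - x|)
    (htie : ∀ (k : Nat) (hk : k < s.length), |s[k] - x| = |s[j] - x| → s[j] ≤ s[k]) :
    PySem.List.min? s (fun v => |v - x|) = some s[j] := by
  obtain ⟨a, t, rfl⟩ : ∃ a t, s = a :: t := by
    cases s with
    | nil => simp at hj
    | cons a t => exact ⟨a, t, rfl⟩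
  rw [pv_min?_eq_gmin]
  have hm_mem : pvGMin (fun v => |v - x|) a t ∈ a :: t :=
    PySem.List.min?_mem (pv_min?_eq_gmin (fun v => |v - x|) t a)
  obtain ⟨km, hkm, hkm_eq⟩ := List.mem_iff_getElem.mp hm_mem
  have h1 : |pvGMin (fun v => |v - x|) a t - x| ≤ |(a :: t)[j] - x| :=
    pvGMin_isMin (fun v => |v - x|) a t (a :: t)[j] (List.getElem_mem hj)
  have h2 : |(a :: t)[j] - x| ≤ |pvGMin (fun v => |v - x|) a t - x| := by
    have h := hmin km hkm
    rw [hkm_eq] at h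
    exact h
  have h3 : pvGMin (fun v => |v - x|) a t ≤ (a :: t)[j] :=
    pvGMin_tie (fun v => |v - x|) t a hs (a :: t)[j] (List.getElem_mem hj) (le_antisymm h2 h1)
  have h4 : (a :: t)[j] ≤ pvGMin (fun v => |v - x|) a t := by
    have h := htie km hkm (by rw [hkm_eq]; exact le_antisymm h1 h2)
    rw [hkm_eq] at h
    exact h
  rw [le_antisymm h3 h4]

-- one pick: B's binary-search choice is exactly A's first minimizer, and deleting it
-- by index is exactly A's remove of the value
lemma pvStep (s : List Int) (x : Int) (hs : s.Pairwise (· ≤ ·)) (hne : s ≠ []) :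
    ∃ (j : Nat) (hj : j < s.length),
      (if pvBisectLeft s x 0 (s.length : Int) = 0 then (0 : Int)
       else if pvBisectLeft s x 0 (s.length : Int) = (s.length : Int) then pvBisectLeft s x 0 (s.length : Int) - 1
       else if x - (PySem.List.pyGet? s (pvBisectLeft s x 0 (s.length : Int) - 1)).getD 0 ≤
              (PySem.List.pyGet? s (pvBisectLeft s x 0 (s.length : Int))).getD 0 - x then pvBisectLeft s x 0 (s.length : Int) - 1
       else pvBisectLeft s x 0 (s.length : Int)) = (j : Int) ∧
      PySem.List.min? s (fun v => |v - x|) = some (s[j]) ∧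
      s.erase s[j] = s.eraseIdx j := by
  have hlen : 0 < s.length := List.length_pos_iff.mpr hne
  obtain ⟨hi0, hil, hpre, hsuf⟩ := pvBisect_spec s x hs s.length 0 (s.length : Int)
    (by omega) (by omega) (by omega) (by omega)
    (fun k hk h => absurd h (by omega)) (fun k hk h => absurd h (by omega))
  set i := pvBisectLeft s x 0 (s.length : Int) with hidef
  by_cases hz : i = 0
  · refine ⟨0, hlen, by rw [if_pos hz]; simp, ?_, pvEraseIdx s hs 0 hlen⟩
    apply pvMinChar s x hs 0 hlen
    · intro k hk
      have hxk : x ≤ s[k] := hsuf k hk (by omega)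
      have hx0 : x ≤ s[0] := hsuf 0 hlen (by omega)
      have hmono : s[0] ≤ s[k] := pvMono s hs (Nat.zero_le k) hk
      rw [pvAbsSub, pvAbsSub]; omega
    · intro k hk _
      exact pvMono s hs (Nat.zero_le k) hk
  · by_cases hfull : i = (s.length : Int)
    · refine ⟨s.length - 1, by omega, ?_, ?_, pvEraseIdx s hs (s.length - 1) (by omega)⟩
      · rw [if_neg hz, if_pos hfull, hfull]; omega
      · apply pvMinChar s x hs (s.length - 1) (by omega)
        · intro k hk
          have hk1 : s[k] < x := hpre k hk (by omega)
          have hl1 : s[s.length - 1] < x := hpre (s.length - 1) (by omega) (by omega)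
          have hmono : s[k] ≤ s[s.length - 1] := pvMono s hs (by omega) (by omega)
          rw [pvAbsSub, pvAbsSub]; omega
        · intro k hk htie
          have hk1 : s[k] < x := hpre k hk (by omega)
          have hl1 : s[s.length - 1] < x := hpre (s.length - 1) (by omega) (by omega)
          rw [pvAbsSub, pvAbsSub] at htie
          omega
    · -- 0 < i < len: both neighbours exist
      have hirange : 0 < i ∧ i < (s.length : Int) := by omega
      have hiN : i = ((i.toNat : Nat) : Int) := by omega
      have hiN1 : i - 1 = (((i.toNat - 1 : Nat)) : Int) := by omega
      have hgl : (PySem.List.pyGet? s (i - 1)).getD 0 = s[i.toNat - 1]'(by omega) := by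
        have h := pvGet s (i.toNat - 1) (by omega)
        rw [← hiN1] at h
        exact h
      have hgr : (PySem.List.pyGet? s i).getD 0 = s[i.toNat]'(by omega) := by
        have h := pvGet s i.toNat (by omega)
        rw [← hiN] at h
        exact h
      have hsm : s[i.toNat - 1]'(by omega) < x := hpre (i.toNat - 1) (by omega) (by omega)
      have hsx : x ≤ s[i.toNat]'(by omega) := hsuf i.toNat (by omega) (by omega)
      by_cases hC : x - s[i.toNat - 1]'(by omega) ≤ s[i.toNat]'(by omega) - x
      · refine ⟨i.toNat - 1, by omega, ?_, ?_, pvEraseIdx s hs (i.toNat - 1) (by omega)⟩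
        · rw [if_neg hz, if_neg hfull, hgl, hgr, if_pos hC]; omega
        · apply pvMinChar s x hs (i.toNat - 1) (by omega)
          · intro k hk
            rcases Nat.lt_or_ge k i.toNat with hki | hki
            · have hkx : s[k] < x := hpre k hk (by omega)
              have hmono : s[k] ≤ s[i.toNat - 1]'(by omega) := pvMono s hs (by omega) (by omega)
              rw [pvAbsSub, pvAbsSub]; omega
            · have hkx : x ≤ s[k] := hsuf k hk (by omega)
              have hmono : s[i.toNat]'(by omega) ≤ s[k] := pvMono s hs (by omega) hk
              rw [pvAbsSub, pvAbsSub]; omega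
          · intro k hk htie
            rcases Nat.lt_or_ge k i.toNat with hki | hki
            · have hkx : s[k] < x := hpre k hk (by omega)
              rw [pvAbsSub, pvAbsSub] at htie
              omega
            · have hkx : x ≤ s[k] := hsuf k hk (by omega)
              omega
      · refine ⟨i.toNat, by omega, ?_, ?_, pvEraseIdx s hs i.toNat (by omega)⟩
        · rw [if_neg hz, if_neg hfull, hgl, hgr, if_neg hC]; omega
        · apply pvMinChar s x hs i.toNat (by omega)
          · intro k hk
            rcases Nat.lt_or_ge k i.toNat with hki | hki
            · have hkx : s[k] < x := hpre k hk (by omega)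
              have hmono : s[k] ≤ s[i.toNat - 1]'(by omega) := pvMono s hs (by omega) (by omega)
              rw [pvAbsSub, pvAbsSub]; omega
            · have hkx : x ≤ s[k] := hsuf k hk (by omega)
              have hmono : s[i.toNat]'(by omega) ≤ s[k] := pvMono s hs (by omega) hk
              rw [pvAbsSub, pvAbsSub]; omega
          · intro k hk htie
            rcases Nat.lt_or_ge k i.toNat with hki | hki
            · have hkx : s[k] < x := hpre k hk (by omega)
              have hmono : s[k] ≤ s[i.toNat - 1]'(by omega) := pvMono s hs (by omega) (by omega)
              rw [pvAbsSub, pvAbsSub] at htie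
              omega
            · have hkx : x ≤ s[k] := hsuf k hk (by omega)
              rw [pvAbsSub, pvAbsSub] at htie
              omega

-- unfold one iteration of B's while loop
lemma pvBLoop_unf (x k : Int) (s : List Int) (h : s ≠ [] ∧ 0 < k) :
    pvBLoop x k s =
      (let i := pvBisectLeft s x 0 (s.length : Int)
       let j := if i = 0 then (0 : Int)
                else if i = (s.length : Int) then i - 1
                else if x - (PySem.List.pyGet? s (i-1)).getD 0 ≤ (PySem.List.pyGet? s i).getD 0 - x then i - 1
                else i
       let c := (PySem.List.pyGet? s j).getD 0
       let s' := ((PySem.List.pop? s j).map Prod.snd).getD s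
       let r := pvBLoop x (k-1) s'
       (c :: r.1, r.2)) := by
  rw [pvBLoop, dif_pos h]

-- the two inner loops agree on a sorted remainder
lemma pvInner_eq (x : Int) : ∀ (n : Nat) (k : Int) (s : List Int), k.toNat = n →
    s.Pairwise (· ≤ ·) → pvBLoop x k s = pvAInner x n s := by
  intro n
  induction n using Nat.strong_induction_on with
  | _ n ih =>
    intro k s hkn hs
    by_cases hg : s ≠ [] ∧ 0 < k
    · obtain ⟨j, hj, hjeq, hmin, herase⟩ := pvStep s x hs hg.1
      obtain ⟨m, rfl⟩ : ∃ m, n = m + 1 := ⟨n - 1, by omega⟩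
      have hs' : (s.eraseIdx j).Pairwise (· ≤ ·) := hs.sublist (List.eraseIdx_sublist s j)
      have hrec := ih m (by omega) (k - 1) (s.eraseIdx j) (by omega) hs'
      rw [pvBLoop_unf x k s hg]
      simp only [hjeq, pvGet s j hj, pvPop s j hj, Option.map_some, Option.getD_some]
      rw [pvAInner, if_neg hg.1, hmin]
      simp only [PySem.List.remove?_eq_some_erase s s[j] (List.getElem_mem hj), herase, hrec]
    · rw [pvBLoop, dif_neg hg]
      rcases not_and_or.mp hg with hnil | hk
      · rw [not_not] at hnil
        subst hnil
        cases n with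
        | zero => rfl
        | succ m => rw [pvAInner, if_pos rfl]
      · have : n = 0 := by omega
        subst this
        rfl

-- A's inner loop keeps the remainder sorted
lemma pvAInner_sorted (x : Int) : ∀ (k : Nat) (s : List Int), s.Pairwise (· ≤ ·) →
    (pvAInner x k s).2.Pairwise (· ≤ ·) := by
  intro k
  induction k with
  | zero => intro s hs; exact hs
  | succ k ih =>
    intro s hs
    rw [pvAInner]
    by_cases hnil : s = []
    · rw [if_pos hnil]; exact hs
    · rw [if_neg hnil]
      rcases hm : PySem.List.min? s (fun v => |v - x|) with _ | c
      · exact hs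
      · have hcmem : c ∈ s := PySem.List.min?_mem hm
        simp only [PySem.List.remove?_eq_some_erase s c hcmem]
        exact ih (s.erase c) (hs.sublist List.erase_sublist)

lemma pvFold_eq (nc : Int) : ∀ (a1 : List Int) (acc : List Int × List Int),
    acc.2.Pairwise (· ≤ ·) →
    a1.foldl (fun acc x =>
      let r := pvBLoop x nc acc.2
      (acc.1 ++ r.1, r.2)) acc
    = a1.foldl (fun acc num1 =>
      let r := pvAInner num1 nc.toNat acc.2
      (acc.1 ++ r.1, r.2)) acc := by
  intro a1
  induction a1 with
  | nil => intro acc _; rfl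
  | cons x t ih =>
    intro acc hacc
    simp only [List.foldl_cons]
    rw [pvInner_eq x nc.toNat nc acc.2 rfl hacc]
    exact ih _ (pvAInner_sorted x nc.toNat acc.2 hacc)

-- ===== VERDICT (by name: the statement is the Claim_ definition above) =====
theorem find_closest_numbers_spec : Claim_equal_find_closest_numbers := by
  intro array1 array2 num_closest _
  unfold Spec_find_closest_numbers find_closest_numbers find_closest_numbers_alt
  rw [pvFold_eq]
  have := PySem.List.sorted_pairwise array2 (fun x => x)
  simpa using this
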